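-- pv_equiv track=rewrite | github.com/yurigabrich/LinearAlgebra | text2wolfram.py | text2wolfram
-- ===== SOURCE A (Python) =====
-- def text2wolfram(input_text):
--     '''
--     Convert a matrix structured as text to WolframAlpha syntax.
--     '''
--
--     output = '{{'
--     for i in input_text:
--         if i == ' ':
--             output += ','
--         elif i == ',':
--             output += '},{'
--         else:
--             output += i
--     output += '}}'
--
--     return output
-- ===== SOURCE B (Python) =====
-- def text2wolfram(input_text):
--     '''
--     Convert a matrix structured as text to WolframAlpha syntax.
--     '''
--     rows = input_text.split(',')
--     return '{{' + '},{'.join(','.join(row.split(' ')) for row in rows) + '}}'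
-- ===== Notes on version B (the rewrite author's own statement) =====
-- stated objective: idiomatic
-- what changed: B parses the text into rows (split on comma), rejoins each row's space-separated cells with commas and intercalates the rows with the brace-comma-brace separator inside the outer double braces, instead of A's character-by-character accumulator loop with a three-way branch (split/join run at C level, removing per-character Python bytecode and string concatenation).
import Mathlib
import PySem

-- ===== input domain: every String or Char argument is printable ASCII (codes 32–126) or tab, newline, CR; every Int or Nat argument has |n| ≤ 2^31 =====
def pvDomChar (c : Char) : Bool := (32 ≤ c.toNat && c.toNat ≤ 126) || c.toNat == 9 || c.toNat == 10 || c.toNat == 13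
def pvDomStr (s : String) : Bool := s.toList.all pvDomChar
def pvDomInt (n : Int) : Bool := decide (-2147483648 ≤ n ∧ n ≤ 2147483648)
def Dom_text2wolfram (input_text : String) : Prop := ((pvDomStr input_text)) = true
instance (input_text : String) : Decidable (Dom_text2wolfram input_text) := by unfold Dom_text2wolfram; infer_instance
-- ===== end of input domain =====

-- B rebuilds the output by split/join over the parsed rows and cells instead of A's per-character accumulator loop (same O(n) cost).

-- ===== PORT A =====
-- character-by-character loop over the string, appending the translation of each character
def text2wolfram (input_text : String) : String :=
  String.mk
    ((input_text.toList.foldl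
      (fun output i =>
        if i = ' ' then output ++ [',']
        else if i = ',' then output ++ ['}', ',', '{']
        else output ++ [i])
      ['{', '{']) ++ ['}', '}'])

-- ===== PORT B =====
-- split on comma into rows; rejoin each row's space-separated cells with commas; intercalate the rows with the brace-comma-brace separator
def text2wolfram_alt (input_text : String) : String :=
  String.mk
    (['{', '{'] ++
      PySem.Chars.join ['}', ',', '{']
        ((PySem.Chars.splitOn input_text.toList [',']).map
          (fun row => PySem.Chars.join [','] (PySem.Chars.splitOn row [' ']))) ++
      ['}', '}'])

-- ===== PRECONDITION & SPEC =====
def Spec_text2wolfram (input_text : String) (out : String) : Prop := out = text2wolfram_alt input_text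
instance (input_text : String) (out : String) : Decidable (Spec_text2wolfram input_text out) := by unfold Spec_text2wolfram; infer_instance

-- ===== CLAIM (what is proved, stated in full; the proofs are below) =====
def Claim_equal_text2wolfram : Prop := ∀ (input_text : String), Dom_text2wolfram input_text → Spec_text2wolfram input_text (text2wolfram input_text)

-- ===== LEMMAS AND PROOFS =====

-- the per-character translation A applies
def pvRepl (c : Char) : List Char :=
  if c = ' ' then [','] else if c = ',' then ['}', ',', '{'] else [c]

-- simple structural single-character split (proof-side model of Chars.splitOn with a one-char separator)
def pvConsHead (a : Char) : List (List Char) → List (List Char)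
  | [] => [[a]]
  | h :: t => (a :: h) :: t

def pvSplitc (c : Char) : List Char → List (List Char)
  | [] => [[]]
  | x :: xs => if x = c then [] :: pvSplitc c xs else pvConsHead x (pvSplitc c xs)

def pvHeadPre (p : List Char) : List (List Char) → List (List Char)
  | [] => [p]
  | h :: t => (p ++ h) :: t

theorem pvSplitc_ne_nil (c : Char) (cs : List Char) : pvSplitc c cs ≠ [] := by
  cases cs with
  | nil => simp [pvSplitc]
  | cons x xs =>
    simp only [pvSplitc]
    split
    · simp
    · cases h : pvSplitc c xs <;> simp [pvConsHead]

theorem pvHeadPre_nil_of_ne (s : List (List Char)) (h : s ≠ []) : pvHeadPre [] s = s := by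
  cases s with
  | nil => exact absurd rfl h
  | cons a t => simp [pvHeadPre]

theorem pv_go_single (c : Char) (l : List Char) :
    ∀ (fuel : Nat) (cur : List Char) (acc : List (List Char)), l.length < fuel →
      PySem.Chars.splitOn.go [c] fuel l cur acc =
        acc.reverse ++ pvHeadPre cur.reverse (pvSplitc c l) := by
  induction l with
  | nil =>
    intro fuel cur acc hf
    cases fuel with
    | zero => omega
    | succ f => simp [PySem.Chars.splitOn.go, pvSplitc, pvHeadPre]
  | cons x xs ih =>
    intro fuel cur acc hf
    cases fuel with
    | zero => omega
    | succ f =>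
      have hxs : xs.length < f := by simpa using Nat.lt_of_succ_lt_succ hf
      by_cases hx : x = c
      · subst hx
        have hpre : List.isPrefixOf [x] (x :: xs) = true := by
          simp [List.isPrefixOf]
        rw [PySem.Chars.splitOn.go]
        simp only [hpre, if_true, List.length_cons, List.length_nil, List.drop_succ_cons,
          List.drop_zero]
        rw [ih f [] (cur.reverse :: acc) hxs]
        rw [show pvSplitc x (x :: xs) = [] :: pvSplitc x xs from by simp [pvSplitc]]
        rw [List.reverse_nil, pvHeadPre_nil_of_ne _ (pvSplitc_ne_nil x xs)]
        simp [pvHeadPre]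
      · have hpre : List.isPrefixOf [c] (x :: xs) = false := by
          simp [List.isPrefixOf]
          exact fun h => absurd h.symm hx
        rw [PySem.Chars.splitOn.go]
        rw [if_neg (by simp [hpre])]
        rw [ih f (x :: cur) acc hxs]
        simp only [pvSplitc, if_neg hx, List.reverse_cons]
        cases h : pvSplitc c xs with
        | nil => exact absurd h (pvSplitc_ne_nil c xs)
        | cons h' t => simp [pvHeadPre, pvConsHead]

theorem pv_splitOn_single (c : Char) (cs : List Char) :
    PySem.Chars.splitOn cs [c] = pvSplitc c cs := by
  unfold PySem.Chars.splitOn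
  rw [pv_go_single c cs (cs.length + 1) [] [] (by omega)]
  simp [pvHeadPre_nil_of_ne _ (pvSplitc_ne_nil c cs)]

theorem pv_intercalate_cons (sep : List Char) (a b : List Char) (t : List (List Char)) :
    List.intercalate sep (a :: b :: t) = a ++ sep ++ List.intercalate sep (b :: t) := by
  simp [List.intercalate, List.intersperse]

-- inner join·split = one-char substitution
theorem pv_inner (d c : Char) (cs : List Char) :
    List.intercalate [d] (pvSplitc c cs) = cs.map (fun x => if x = c then d else x) := by
  induction cs with
  | nil => simp [pvSplitc, List.intercalate]
  | cons x xs ih =>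
    by_cases hx : x = c
    · subst hx
      cases h : pvSplitc x xs with
      | nil => exact absurd h (pvSplitc_ne_nil x xs)
      | cons h' t =>
        rw [show pvSplitc x (x :: xs) = [] :: h' :: t from by simp [pvSplitc, h]]
        rw [pv_intercalate_cons, ← h, ih]
        simp
    · cases h : pvSplitc c xs with
      | nil => exact absurd h (pvSplitc_ne_nil c xs)
      | cons h' t =>
        simp only [pvSplitc, if_neg hx, h, pvConsHead]
        have : List.intercalate [d] ((x :: h') :: t) = x :: List.intercalate [d] (h' :: t) := by
          cases t with
          | nil => simp [List.intercalate]
          | cons b t' => rw [pv_intercalate_cons, pv_intercalate_cons]; simp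
        rw [this, ← h, ih, List.map_cons, if_neg hx]

-- outer join over substituted rows = A's character-wise flatMap
theorem pv_outer (cs : List Char) :
    List.intercalate ['}', ',', '{']
      ((pvSplitc ',' cs).map (List.map (fun x => if x = ' ' then ',' else x))) =
      cs.flatMap pvRepl := by
  induction cs with
  | nil => simp [pvSplitc, List.intercalate]
  | cons x xs ih =>
    by_cases hx : x = ','
    · subst hx
      cases h : pvSplitc ',' xs with
      | nil => exact absurd h (pvSplitc_ne_nil ',' xs)
      | cons h' t =>
        rw [show pvSplitc ',' (',' :: xs) = [] :: h' :: t from by simp [pvSplitc, h]]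
        simp only [List.map_cons]
        rw [pv_intercalate_cons, ← List.map_cons, ← h, ih]
        simp [pvRepl]
    · cases h : pvSplitc ',' xs with
      | nil => exact absurd h (pvSplitc_ne_nil ',' xs)
      | cons h' t =>
        simp only [pvSplitc, if_neg hx, h, pvConsHead, List.map_cons]
        have key : ∀ (m : List Char) (t' : List (List Char)) (y : Char),
            List.intercalate ['}', ',', '{'] ((y :: m) :: t') =
              y :: List.intercalate ['}', ',', '{'] (m :: t') := by
          intro m t' y
          cases t' with
          | nil => simp [List.intercalate]
          | cons b t'' => rw [pv_intercalate_cons, pv_intercalate_cons]; simp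
        rw [key]
        rw [show (List.map (fun x => if x = ' ' then ',' else x) h') :: List.map (List.map fun x => if x = ' ' then ',' else x) t
              = (pvSplitc ',' xs).map (List.map (fun x => if x = ' ' then ',' else x)) by rw [h]; simp]
        rw [ih]
        by_cases hsp : x = ' ' <;> simp [pvRepl, hsp, hx]

theorem pv_foldl_repl (cs : List Char) : ∀ (a : List Char),
    cs.foldl
      (fun output i =>
        if i = ' ' then output ++ [',']
        else if i = ',' then output ++ ['}', ',', '{']
        else output ++ [i]) a = a ++ cs.flatMap pvRepl := by
  induction cs with
  | nil => simp
  | cons x xs ih =>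
    intro a
    simp only [List.foldl_cons, List.flatMap_cons, ih]
    by_cases h1 : x = ' ' <;> by_cases h2 : x = ',' <;> simp [pvRepl, h1, h2]

-- ===== VERDICT (by name: the statement is the Claim_ definition above) =====
theorem text2wolfram_spec : Claim_equal_text2wolfram := by
  intro input_text _
  unfold Spec_text2wolfram text2wolfram text2wolfram_alt
  congr 1
  rw [pv_foldl_repl]
  simp only [PySem.Chars.join, pv_splitOn_single]
  have : (pvSplitc ',' input_text.toList).map
      (fun row => List.intercalate [','] (pvSplitc ' ' row)) =
      (pvSplitc ',' input_text.toList).map (List.map (fun x => if x = ' ' then ',' else x)) := by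
    apply List.map_congr_left
    intro row _
    exact pv_inner ',' ' ' row
  rw [this, pv_outer]
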